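-- pv_equiv track=rewrite | github.com/Klaudia1303/student_code_analysis | Progetto-tirocinio2024/data/student_data/2065102_Pascarella/LabPython08/LabPython08/A_Ex3.py | A_Ex3
-- ===== SOURCE A (Python) =====
-- def A_Ex3(l):
--     insieme=set()
--
--     if len(l)<=0:
--         return(insieme)
--
--     for stringa in l:
--         for stringa2 in l:
--             if stringa!=stringa2 and len(stringa)==len(stringa2):
--                 aggiungi=(stringa, stringa2)
--                 insieme.add(aggiungi)
--
--     return(insieme)
--     """MODIFICARE IL CONTENUTO DI QUESTA FUNZIONE PER SVOLGERE L'ESERCIZIO"""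
-- ===== SOURCE B (Python) =====
-- def A_Ex3(l):
--     buckets = {}
--     for s in l:
--         buckets.setdefault(len(s), []).append(s)
--     out = set()
--     for s in l:
--         for t in buckets[len(s)]:
--             if t != s:
--                 out.add((s, t))
--     return out
-- ===== Notes on version B (the rewrite author's own statement) =====
-- stated objective: faster
-- what changed: B buckets the strings by length in one dict pass and pairs each string only with its own bucket, replacing A's all-pairs double scan with a length-comparison on every pair.
import Mathlib
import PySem

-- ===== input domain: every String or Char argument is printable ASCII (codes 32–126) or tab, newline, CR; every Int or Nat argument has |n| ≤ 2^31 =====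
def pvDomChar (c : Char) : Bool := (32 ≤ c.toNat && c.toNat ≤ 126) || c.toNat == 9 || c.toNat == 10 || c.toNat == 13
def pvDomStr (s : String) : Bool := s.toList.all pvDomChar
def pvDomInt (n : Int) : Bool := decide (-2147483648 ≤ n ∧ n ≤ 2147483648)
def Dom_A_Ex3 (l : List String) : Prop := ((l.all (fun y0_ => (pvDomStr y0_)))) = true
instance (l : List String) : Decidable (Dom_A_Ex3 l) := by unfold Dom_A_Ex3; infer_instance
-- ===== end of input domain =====

-- B buckets strings by length in one dict pass and pairs only within each bucket (faster: no all-pairs scan).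
-- ===== PORT A =====
-- literal port: empty-list guard, then nested loops over l adding (s, t) for distinct equal-length strings
def A_Ex3 (l : List String) : List (String × String) :=
  if l.length ≤ 0 then ([] : PySem.Set (String × String))
  else
    l.foldl (fun ins s =>
      l.foldl (fun ins s2 =>
        if s ≠ s2 ∧ PySem.Str.len s = PySem.Str.len s2 then PySem.Set.add ins (s, s2) else ins)
        ins)
      ([] : PySem.Set (String × String))

-- ===== PORT B =====
-- buckets.setdefault(len(s), []).append(s) ported as Dict.modify (append to the list at key len(s))
def A_Ex3_altBuckets (l : List String) : PySem.Dict Int (List String) :=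
  l.foldl (fun d s => d.modify (PySem.Str.len s) [] (· ++ [s])) PySem.Dict.empty

def A_Ex3_alt (l : List String) : List (String × String) :=
  let buckets := A_Ex3_altBuckets l
  l.foldl (fun out s =>
    (buckets.getD (PySem.Str.len s) []).foldl (fun out t =>
      if t ≠ s then PySem.Set.add out (s, t) else out)
      out)
    ([] : PySem.Set (String × String))

-- ===== PRECONDITION & SPEC =====
def Spec_A_Ex3 (l : List String) (out : List (String × String)) : Prop := out = A_Ex3_alt l
instance (l : List String) (out : List (String × String)) : Decidable (Spec_A_Ex3 l out) := by unfold Spec_A_Ex3; infer_instance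

-- ===== CLAIM (what is proved, stated in full; the proofs are below) =====
def Claim_equal_A_Ex3 : Prop := ∀ (l : List String), Dom_A_Ex3 l → Spec_A_Ex3 l (A_Ex3 l)

-- ===== LEMMAS AND PROOFS =====

-- the bucket at key L is exactly the sublist of l with length L, in order
theorem buckets_getD (l : List String) (L : Int) :
    (A_Ex3_altBuckets l).getD L [] = l.filter (fun t => PySem.Str.len t == L) := by
  unfold A_Ex3_altBuckets
  have h : l.foldl (fun d s => d.modify (PySem.Str.len s) [] (· ++ [s])) PySem.Dict.empty
      = (l.map (fun s => (PySem.Str.len s, s))).foldl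
          (fun d p => d.modify p.1 [] (· ++ [p.2])) PySem.Dict.empty := by
    rw [List.foldl_map]
  rw [h, PySem.Dict.getD_foldl_modify_append, PySem.Dict.getD_empty]
  simp [List.filter_map, Function.comp_def, List.map_map]

-- A's inner scan over l with the equal-length test is B's inner scan over the filter
theorem inner_eq (s : String) (xs : List String) (acc : PySem.Set (String × String)) :
    xs.foldl (fun ins s2 =>
        if s ≠ s2 ∧ PySem.Str.len s = PySem.Str.len s2 then PySem.Set.add ins (s, s2) else ins) acc
    = (xs.filter (fun t => PySem.Str.len t == PySem.Str.len s)).foldl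
        (fun out t => if t ≠ s then PySem.Set.add out (s, t) else out) acc := by
  induction xs generalizing acc with
  | nil => rfl
  | cons x xs ih =>
    rw [List.foldl_cons, List.filter_cons]
    by_cases hl : PySem.Str.len x = PySem.Str.len s
    · have hb : (PySem.Str.len x == PySem.Str.len s) = true := by
        simp only [beq_iff_eq]; exact hl
      rw [hb, if_pos rfl, List.foldl_cons]
      by_cases hx : x = s
      · subst hx
        rw [if_neg (show ¬(x ≠ x ∧ PySem.Str.len x = PySem.Str.len x) from fun h => h.1 rfl),
            if_neg (show ¬(x ≠ x) from fun h => h rfl)]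
        exact ih acc
      · rw [if_pos (show s ≠ x ∧ PySem.Str.len s = PySem.Str.len x from
              ⟨fun h => hx h.symm, hl.symm⟩),
            if_pos (show x ≠ s from hx)]
        exact ih _
    · have hb : (PySem.Str.len x == PySem.Str.len s) = false := by
        simp only [beq_eq_false_iff_ne, ne_eq]; exact hl
      rw [hb, if_neg Bool.false_ne_true,
          if_neg (show ¬(s ≠ x ∧ PySem.Str.len s = PySem.Str.len x) from fun h => hl h.2.symm)]
      exact ih acc

theorem A_eq_alt (l : List String) : A_Ex3 l = A_Ex3_alt l := by
  unfold A_Ex3 A_Ex3_alt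
  have hstep : (fun (ins : PySem.Set (String × String)) (s : String) =>
      l.foldl (fun ins s2 =>
        if s ≠ s2 ∧ PySem.Str.len s = PySem.Str.len s2 then PySem.Set.add ins (s, s2) else ins) ins)
    = (fun (out : PySem.Set (String × String)) (s : String) =>
      ((A_Ex3_altBuckets l).getD (PySem.Str.len s) []).foldl
        (fun out t => if t ≠ s then PySem.Set.add out (s, t) else out) out) := by
    funext acc s
    rw [inner_eq, buckets_getD]
  cases l with
  | nil => rfl
  | cons a as =>
    rw [if_neg (by simp)]
    rw [hstep]

-- ===== VERDICT (by name: the statement is the Claim_ definition above) =====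
theorem A_Ex3_spec : Claim_equal_A_Ex3 := by
  intro l _
  unfold Spec_A_Ex3
  exact A_eq_alt l
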